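-- pv_equiv track=rewrite | github.com/pypi-data/pypi-mirror-402 | packages/aisentry/aisentry-1.0.0.tar.gz/aisentry-1.0.0/src/aisentry/scorers/data_privacy_scorer.py | _score_data_lifecycle_comprehensive
-- ===== SOURCE A (Python) =====
-- from typing import Any, Dict, List
--
-- def _score_data_lifecycle_comprehensive(parsed_data: Dict[str, Any]) -> int:
--     """
--     Score comprehensive Data Lifecycle Management (0-100) - Evidence-Based
--
--     Uses AST-based function detection for data lifecycle policies.
--     Data lifecycle management ensures proper retention and deletion.
--
--     Scoring based on lifecycle management:
--     - Retention + Deletion + Archival: 100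
--     - Retention + Deletion: 75
--     - Deletion only: 50
--     - None detected: 0
--     """
--     # Data lifecycle is primarily about policy functions
--     function_defs = parsed_data.get('function_defs', [])
--     function_names = [f.lower() for f in function_defs]
--
--     # Retention policy functions
--     retention_patterns = [
--         'retention_policy', 'set_retention', 'data_retention',
--         'retention_period', 'expire_data', 'ttl'
--     ]
--     has_retention = any(
--         any(pattern in func for pattern in retention_patterns)
--         for func in function_names
--     )
--
--     # Data deletion functions
--     deletion_patterns = [
--         'delete_data', 'purge_data', 'remove_data', 'erase_data',
--         'cleanup_data', 'expire_records'
--     ]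
--     has_deletion = any(
--         any(pattern in func for pattern in deletion_patterns)
--         for func in function_names
--     )
--
--     # Data archival functions
--     archival_patterns = [
--         'archive_data', 'archive_records', 'cold_storage',
--         'move_to_archive', 'backup_data'
--     ]
--     has_archival = any(
--         any(pattern in func for pattern in archival_patterns)
--         for func in function_names
--     )
--
--     # Score based on lifecycle features
--     if has_retention and has_deletion and has_archival:
--         return 100
--     elif has_retention and has_deletion:
--         return 75
--     elif has_deletion:
--         return 50
--     else:
--         return 0
-- ===== SOURCE B (Python) =====
-- def _score_data_lifecycle_comprehensive(parsed_data):
--     # Sliding-window multi-pattern matcher: one dict pattern -> category,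
--     # scan each position of each lowercased name once, probing the fixed
--     # window lengths by hash lookup (no per-pattern substring scans).
--     category = {
--         'retention_policy': 'R', 'set_retention': 'R', 'data_retention': 'R',
--         'retention_period': 'R', 'expire_data': 'R', 'ttl': 'R',
--         'delete_data': 'D', 'purge_data': 'D', 'remove_data': 'D',
--         'erase_data': 'D', 'cleanup_data': 'D', 'expire_records': 'D',
--         'archive_data': 'A', 'archive_records': 'A', 'cold_storage': 'A',
--         'move_to_archive': 'A', 'backup_data': 'A',
--     }
--     lengths = sorted({len(p) for p in category})
--     has_retention = has_deletion = has_archival = False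
--     for name in parsed_data.get('function_defs', []):
--         s = name.lower()
--         for i in range(len(s)):
--             for L in lengths:
--                 c = category.get(s[i:i + L])
--                 if c == 'R':
--                     has_retention = True
--                 elif c == 'D':
--                     has_deletion = True
--                 elif c == 'A':
--                     has_archival = True
--     if has_retention and has_deletion and has_archival:
--         return 100
--     elif has_retention and has_deletion:
--         return 75
--     elif has_deletion:
--         return 50
--     else:
--         return 0
-- ===== Notes on version B (the rewrite author's own statement) =====
-- stated objective: alternative
-- what changed: B replaces A's per-pattern substring scans with a sliding-window multi-pattern matcher: one dict maps each pattern to its category, and a single pass over every position of each lowercased name probes the distinct window lengths by hash lookup, so the three pattern lists and their nested 'pattern in name' scans disappear.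
import Mathlib
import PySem

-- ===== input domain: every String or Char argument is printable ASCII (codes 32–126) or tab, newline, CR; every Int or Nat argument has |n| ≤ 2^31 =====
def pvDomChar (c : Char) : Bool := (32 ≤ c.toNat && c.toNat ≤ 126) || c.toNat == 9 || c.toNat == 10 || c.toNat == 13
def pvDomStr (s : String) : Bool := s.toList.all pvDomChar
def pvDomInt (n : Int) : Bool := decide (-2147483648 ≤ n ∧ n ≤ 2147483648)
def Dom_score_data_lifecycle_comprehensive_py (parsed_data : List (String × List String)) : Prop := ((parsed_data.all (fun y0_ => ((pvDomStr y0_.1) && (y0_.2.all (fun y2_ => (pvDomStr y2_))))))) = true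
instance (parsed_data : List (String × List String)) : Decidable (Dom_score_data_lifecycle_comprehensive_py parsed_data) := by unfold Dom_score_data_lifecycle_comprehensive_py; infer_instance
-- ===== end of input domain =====

-- B replaces A's per-pattern substring scans with a sliding-window matcher: one dict pattern→category,
-- probing each position's fixed-length windows by lookup (alternative algorithm, not claimed faster).


-- ===== PORT A =====
def retentionPatterns : List String :=
  ["retention_policy", "set_retention", "data_retention",
   "retention_period", "expire_data", "ttl"]

def deletionPatterns : List String :=
  ["delete_data", "purge_data", "remove_data", "erase_data",
   "cleanup_data", "expire_records"]

def archivalPatterns : List String :=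
  ["archive_data", "archive_records", "cold_storage",
   "move_to_archive", "backup_data"]

def score_data_lifecycle_comprehensive_py (parsed_data : List (String × List String)) : Int :=
  let function_defs := PySem.Dict.getD (PySem.Dict.mk parsed_data) "function_defs" []
  let function_names := function_defs.map (fun f => PySem.Str.lower f)
  let has_retention :=
    function_names.any (fun func => retentionPatterns.any (fun pattern => PySem.Str.isIn pattern func))
  let has_deletion :=
    function_names.any (fun func => deletionPatterns.any (fun pattern => PySem.Str.isIn pattern func))
  let has_archival :=
    function_names.any (fun func => archivalPatterns.any (fun pattern => PySem.Str.isIn pattern func))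
  if has_retention && has_deletion && has_archival then 100
  else if has_retention && has_deletion then 75
  else if has_deletion then 50
  else 0

-- ===== PORT B =====
-- the Python dict literal 'category' (pattern → category letter)
def categoryDict : PySem.Dict String String := PySem.Dict.mk
  [("retention_policy", "R"), ("set_retention", "R"), ("data_retention", "R"),
   ("retention_period", "R"), ("expire_data", "R"), ("ttl", "R"),
   ("delete_data", "D"), ("purge_data", "D"), ("remove_data", "D"),
   ("erase_data", "D"), ("cleanup_data", "D"), ("expire_records", "D"),
   ("archive_data", "A"), ("archive_records", "A"), ("cold_storage", "A"),
   ("move_to_archive", "A"), ("backup_data", "A")]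

-- lengths = sorted({len(p) for p in category})
def windowLengths : List Int :=
  PySem.List.sorted
    (PySem.Set.ofList ((PySem.Dict.keys categoryDict).map (fun p => PySem.Str.len p)))
    (fun x => x) false

def score_data_lifecycle_comprehensive_py_alt (parsed_data : List (String × List String)) : Int :=
  let function_defs := PySem.Dict.getD (PySem.Dict.mk parsed_data) "function_defs" []
  let st := function_defs.foldl (fun st name =>
      let s := PySem.Str.lower name
      (PySem.List.pyRange 0 (PySem.Str.len s) 1).foldl (fun st i =>
        windowLengths.foldl (fun st L =>
          let c := PySem.Dict.get? categoryDict (PySem.Str.slice s (some i) (some (i + L)))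
          if c = some "R" then (true, st.2.1, st.2.2)
          else if c = some "D" then (st.1, true, st.2.2)
          else if c = some "A" then (st.1, st.2.1, true)
          else st) st) st)
    (false, false, false)
  if st.1 && st.2.1 && st.2.2 then 100
  else if st.1 && st.2.1 then 75
  else if st.2.1 then 50
  else 0

-- ===== PRECONDITION & SPEC =====
def Spec_score_data_lifecycle_comprehensive_py (parsed_data : List (String × List String)) (out : Int) : Prop := out = score_data_lifecycle_comprehensive_py_alt parsed_data
instance (parsed_data : List (String × List String)) (out : Int) : Decidable (Spec_score_data_lifecycle_comprehensive_py parsed_data out) := by unfold Spec_score_data_lifecycle_comprehensive_py; infer_instance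

-- ===== CLAIM (what is proved, stated in full; the proofs are below) =====
def Claim_equal_score_data_lifecycle_comprehensive_py : Prop := ∀ (parsed_data : List (String × List String)), Dom_score_data_lifecycle_comprehensive_py parsed_data → Spec_score_data_lifecycle_comprehensive_py parsed_data (score_data_lifecycle_comprehensive_py parsed_data)

-- ===== LEMMAS AND PROOFS =====

-- B's window hit test for one category, as a Boolean on (name, position, window length)
def pvHit (cat : String) (s : String) (i L : Int) : Bool :=
  PySem.Dict.get? categoryDict (PySem.Str.slice s (some i) (some (i + L))) = some cat

-- a fold whose step or-updates the three components independently is three `any`s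
theorem pv_foldl_or3 {α : Type} (f g h : α → Bool) (l : List α) (st : Bool × Bool × Bool) :
    l.foldl (fun st x => (st.1 || f x, st.2.1 || g x, st.2.2 || h x)) st
      = (st.1 || l.any f, st.2.1 || l.any g, st.2.2 || l.any h) := by
  induction l generalizing st with
  | nil => simp
  | cons a t ih => simp [ih, Bool.or_assoc]

-- the innermost (window-length) step is or-shaped
theorem pv_inner_step (s : String) (i : Int) :
    (fun (st : Bool × Bool × Bool) L =>
      let c := PySem.Dict.get? categoryDict (PySem.Str.slice s (some i) (some (i + L)))
      if c = some "R" then (true, st.2.1, st.2.2)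
      else if c = some "D" then (st.1, true, st.2.2)
      else if c = some "A" then (st.1, st.2.1, true)
      else st)
    = fun st L => (st.1 || pvHit "R" s i L, st.2.1 || pvHit "D" s i L, st.2.2 || pvHit "A" s i L) := by
  funext st L
  simp only [pvHit]
  split_ifs with h1 h2 h3 <;> simp_all

theorem pv_windowLengths : windowLengths = [3, 10, 11, 12, 13, 14, 15, 16] := by decide

theorem pv_len_nonneg : ∀ L ∈ windowLengths, (0:Int) ≤ L := by rw [pv_windowLengths]; decide

theorem pv_scan_eq_isIn (cat : String) (pats : List String) (s : String)
    (hget : ∀ k : String, (PySem.Dict.get? categoryDict k = some cat) ↔ k ∈ pats)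
    (hlen : ∀ p ∈ pats, (PySem.Str.len p) ∈ windowLengths ∧ p.toList ≠ []) :
    ((PySem.List.pyRange 0 (PySem.Str.len s) 1).any (fun i => windowLengths.any (fun L => pvHit cat s i L)))
      = pats.any (fun p => PySem.Str.isIn p s) := by
  rw [Bool.eq_iff_iff]
  simp only [List.any_eq_true, PySem.List.mem_pyRange_one, pvHit, decide_eq_true_eq,
    PySem.Str.isIn_iff_infix]
  constructor
  · rintro ⟨i, ⟨hi0, _⟩, L, hL, hEq⟩
    refine ⟨_, (hget _).mp hEq, ?_⟩
    have h0L : (0:Int) ≤ L := pv_len_nonneg L hL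
    have hsl : (PySem.Str.slice s (some i) (some (i + L))).toList
        = (s.toList.drop i.toNat).take ((i + L).toNat - i.toNat) := by
      rw [PySem.Str.toList_slice, PySem.Chars.slice_eq_listSlice,
        PySem.List.slice_toNat s.toList hi0 (by omega)]
    rw [hsl]
    exact (List.take_prefix _ _).isInfix.trans (List.drop_suffix _ _).isInfix
  · rintro ⟨p, hp, hinf⟩
    obtain ⟨hLmem, hnil⟩ := hlen p hp
    obtain ⟨j, hj⟩ := (PySem.Chars.exists_prefix_drop_iff_isIn p.toList s.toList).mpr
      ((PySem.Str.isIn_iff_infix p s).mpr hinf)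
    have hjlt : j < s.toList.length := by
      rcases Nat.lt_or_ge j s.toList.length with h | h
      · exact h
      · exact absurd (List.prefix_nil.mp (by rwa [List.drop_eq_nil_of_le h] at hj)) hnil
    refine ⟨(j:Int), ⟨by omega, by rw [PySem.Str.len_eq]; exact_mod_cast hjlt⟩,
      PySem.Str.len p, hLmem, ?_⟩
    have hslice : (PySem.Str.slice s (some (j:Int)) (some ((j:Int) + PySem.Str.len p))) = p := by
      have h1 : (PySem.Str.slice s (some (j:Int)) (some ((j:Int) + PySem.Str.len p))).toList
          = (s.toList.drop j).take p.toList.length := by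
        rw [PySem.Str.toList_slice, PySem.Chars.slice_eq_listSlice,
          PySem.List.slice_toNat s.toList (by omega) (by rw [PySem.Str.len_eq]; omega),
          PySem.Str.len_eq]
        have e1 : (((j:Int) + (p.toList.length:Int)).toNat - ((j:Int)).toNat) = p.toList.length := by
          omega
        rw [e1, Int.toNat_natCast]
      have h2 : (PySem.Str.slice s (some (j:Int)) (some ((j:Int) + PySem.Str.len p))).toList
          = p.toList := by
        rw [h1, ← List.prefix_iff_eq_take.mp hj]
      have := congrArg String.ofList h2
      simpa using this
    rw [hslice]
    exact (hget p).mpr hp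

theorem pv_get_R (k : String) :
    PySem.Dict.get? categoryDict k = some "R" ↔ k ∈ retentionPatterns := by
  rw [PySem.Dict.get?_eq_some_iff_mem_items categoryDict k "R" (by decide)]
  simp [categoryDict, retentionPatterns]

theorem pv_get_D (k : String) :
    PySem.Dict.get? categoryDict k = some "D" ↔ k ∈ deletionPatterns := by
  rw [PySem.Dict.get?_eq_some_iff_mem_items categoryDict k "D" (by decide)]
  simp [categoryDict, deletionPatterns]

theorem pv_get_A (k : String) :
    PySem.Dict.get? categoryDict k = some "A" ↔ k ∈ archivalPatterns := by
  rw [PySem.Dict.get?_eq_some_iff_mem_items categoryDict k "A" (by decide)]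
  simp [categoryDict, archivalPatterns]

theorem pv_lens_R : ∀ p ∈ retentionPatterns, (PySem.Str.len p) ∈ windowLengths ∧ p.toList ≠ [] := by
  decide

theorem pv_lens_D : ∀ p ∈ deletionPatterns, (PySem.Str.len p) ∈ windowLengths ∧ p.toList ≠ [] := by
  decide

theorem pv_lens_A : ∀ p ∈ archivalPatterns, (PySem.Str.len p) ∈ windowLengths ∧ p.toList ≠ [] := by
  decide

-- one name's scan (positions × window lengths) or-updates the three flags by its three category hits
theorem pv_name_step (st : Bool × Bool × Bool) (s : String) :
    ((PySem.List.pyRange 0 (PySem.Str.len s) 1).foldl (fun st i =>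
        windowLengths.foldl (fun st L =>
          let c := PySem.Dict.get? categoryDict (PySem.Str.slice s (some i) (some (i + L)))
          if c = some "R" then (true, st.2.1, st.2.2)
          else if c = some "D" then (st.1, true, st.2.2)
          else if c = some "A" then (st.1, st.2.1, true)
          else st) st) st)
      = (st.1 || retentionPatterns.any (fun p => PySem.Str.isIn p s),
         st.2.1 || deletionPatterns.any (fun p => PySem.Str.isIn p s),
         st.2.2 || archivalPatterns.any (fun p => PySem.Str.isIn p s)) := by
  have hmid : (fun (st : Bool × Bool × Bool) i =>
      windowLengths.foldl (fun st L =>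
        let c := PySem.Dict.get? categoryDict (PySem.Str.slice s (some i) (some (i + L)))
        if c = some "R" then (true, st.2.1, st.2.2)
        else if c = some "D" then (st.1, true, st.2.2)
        else if c = some "A" then (st.1, st.2.1, true)
        else st) st)
      = fun st i => (st.1 || windowLengths.any (fun L => pvHit "R" s i L),
                     st.2.1 || windowLengths.any (fun L => pvHit "D" s i L),
                     st.2.2 || windowLengths.any (fun L => pvHit "A" s i L)) := by
    funext st i
    rw [pv_inner_step s i, pv_foldl_or3]
  rw [hmid, pv_foldl_or3,
    pv_scan_eq_isIn "R" retentionPatterns s pv_get_R pv_lens_R,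
    pv_scan_eq_isIn "D" deletionPatterns s pv_get_D pv_lens_D,
    pv_scan_eq_isIn "A" archivalPatterns s pv_get_A pv_lens_A]

-- ===== VERDICT (by name: the statement is the Claim_ definition above) =====
theorem score_data_lifecycle_comprehensive_py_spec : Claim_equal_score_data_lifecycle_comprehensive_py := by
  intro parsed_data _
  unfold Spec_score_data_lifecycle_comprehensive_py
  unfold score_data_lifecycle_comprehensive_py score_data_lifecycle_comprehensive_py_alt
  have hfold : ∀ (defs : List String),
      defs.foldl (fun st name =>
        (PySem.List.pyRange 0 (PySem.Str.len (PySem.Str.lower name)) 1).foldl (fun st i =>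
          windowLengths.foldl (fun st L =>
            let c := PySem.Dict.get? categoryDict
              (PySem.Str.slice (PySem.Str.lower name) (some i) (some (i + L)))
            if c = some "R" then (true, st.2.1, st.2.2)
            else if c = some "D" then (st.1, true, st.2.2)
            else if c = some "A" then (st.1, st.2.1, true)
            else st) st) st) (false, false, false)
      = (defs.any (fun f => retentionPatterns.any (fun p => PySem.Str.isIn p (PySem.Str.lower f))),
         defs.any (fun f => deletionPatterns.any (fun p => PySem.Str.isIn p (PySem.Str.lower f))),
         defs.any (fun f => archivalPatterns.any (fun p => PySem.Str.isIn p (PySem.Str.lower f)))) := by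
    intro defs
    have hstep : (fun (st : Bool × Bool × Bool) (name : String) =>
        (PySem.List.pyRange 0 (PySem.Str.len (PySem.Str.lower name)) 1).foldl (fun st i =>
          windowLengths.foldl (fun st L =>
            let c := PySem.Dict.get? categoryDict
              (PySem.Str.slice (PySem.Str.lower name) (some i) (some (i + L)))
            if c = some "R" then (true, st.2.1, st.2.2)
            else if c = some "D" then (st.1, true, st.2.2)
            else if c = some "A" then (st.1, st.2.1, true)
            else st) st) st)
        = fun st name =>
            (st.1 || retentionPatterns.any (fun p => PySem.Str.isIn p (PySem.Str.lower name)),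
             st.2.1 || deletionPatterns.any (fun p => PySem.Str.isIn p (PySem.Str.lower name)),
             st.2.2 || archivalPatterns.any (fun p => PySem.Str.isIn p (PySem.Str.lower name))) := by
      funext st name
      exact pv_name_step st (PySem.Str.lower name)
    rw [hstep, pv_foldl_or3]
    simp
  simp only [hfold, List.any_map, Function.comp_def]
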